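-- pv_equiv track=rewrite | github.com/sgerding17/galaxy-stats | scripts/stats.py | all_combos
-- ===== SOURCE A (Python) =====
-- players = {
--     "1": "Long",
--     "2": "Laurel",
--     "3": "Gerding",
--     "5": "Iwai",
--     "14": "Li",
--     "21": "Saito",
--     "22": "DeMarti",
--     "25": "Yosy",
-- }
--
-- def all_combos(in_game):
--     def combo_name(in_game):
--         if len(in_game) == 1: return in_game[0]
--         return "c|" + "|".join(in_game) + "|"
--
--     combos = [f"!{p}" for p in players.keys() if p not in in_game]
--     for combo_mask in range(1, 2**len(in_game)):
--         combo_players = []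
--         for index in range(len(in_game)):
--             if combo_mask & 2**index:
--                 combo_players.append(in_game[index])
--         combos.append(combo_name(combo_players))
--     return combos
-- ===== SOURCE B (Python) =====
-- players = {
--     "1": "Long",
--     "2": "Laurel",
--     "3": "Gerding",
--     "5": "Iwai",
--     "14": "Li",
--     "21": "Saito",
--     "22": "DeMarti",
--     "25": "Yosy",
-- }
--
-- def all_combos(in_game):
--     def combo_name(s):
--         if len(s) == 1: return s[0]
--         return "c|" + "|".join(s) + "|"
--
--     absent = ["!" + p for p in players.keys() if p not in in_game]
--     # enumerate subsets by iterative doubling: same binary-counting order as a mask loop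
--     subsets = [[]]
--     for player in in_game:
--         subsets = subsets + [s + [player] for s in subsets]
--     return absent + [combo_name(s) for s in subsets[1:]]
-- ===== Notes on version B (the rewrite author's own statement) =====
-- stated objective: alternative
-- what changed: Replaces the bitmask loop (which rebuilds each subset by testing every bit of every mask) with iterative doubling of a subsets list, which extends previously built subsets and reproduces the same binary-counting order without any bit arithmetic.
import Mathlib
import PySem

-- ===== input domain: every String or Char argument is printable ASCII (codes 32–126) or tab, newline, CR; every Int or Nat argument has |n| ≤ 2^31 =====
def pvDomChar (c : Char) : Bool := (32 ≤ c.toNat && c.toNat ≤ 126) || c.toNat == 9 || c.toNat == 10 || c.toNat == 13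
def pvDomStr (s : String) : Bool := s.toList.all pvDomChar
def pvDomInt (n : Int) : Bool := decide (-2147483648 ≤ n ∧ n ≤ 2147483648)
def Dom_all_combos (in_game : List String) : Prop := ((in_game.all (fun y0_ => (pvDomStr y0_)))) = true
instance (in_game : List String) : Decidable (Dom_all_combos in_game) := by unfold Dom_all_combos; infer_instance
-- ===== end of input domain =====

-- B replaces A's bitmask loop (per-mask bit scan rebuilding each subset) by iterative doubling
-- of a subsets list, reproducing the same binary-counting order without bit arithmetic.

-- ===== PORT A =====
-- the module-level 'players' dict: only its keys matter here
def pvPlayers : List String := ["1", "2", "3", "5", "14", "21", "22", "25"]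

-- inner helper combo_name (identical in A and in B's source)
def comboName (s : List String) : String :=
  if s.length == 1 then s.getD 0 "" else "c|" ++ PySem.Str.join "|" s ++ "|"

-- [f"!{p}" for p in players.keys() if p not in in_game] (identical comprehension in A and B)
def absentOf (in_game : List String) : List String :=
  (pvPlayers.filter (fun p => !(in_game.contains p))).map (fun p => "!" ++ p)

-- for combo_mask in range(1, 2**len(in_game)): inner bit loop appends in_game[index]
-- (range(1, k) ported as (List.range k).drop 1; in_game[index] is always in range, ported with getD)
def all_combos (in_game : List String) : List String :=
  ((List.range (2 ^ in_game.length)).drop 1).foldl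
    (fun combos combo_mask =>
      combos ++ [comboName ((List.range in_game.length).foldl
        (fun combo_players index =>
          if combo_mask &&& 2 ^ index != 0 then combo_players ++ [in_game.getD index ""]
          else combo_players) [])])
    (absentOf in_game)

-- ===== PORT B =====
-- subsets = [[]]; for player in in_game: subsets = subsets + [s + [player] for s in subsets]
def all_combos_alt (in_game : List String) : List String :=
  let subsets := in_game.foldl (fun subs player => subs ++ subs.map (fun s => s ++ [player])) [[]]
  absentOf in_game ++ (subsets.drop 1).map comboName

-- ===== PRECONDITION & SPEC =====
def Spec_all_combos (in_game : List String) (out : List String) : Prop := out = all_combos_alt in_game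
instance (in_game : List String) (out : List String) : Decidable (Spec_all_combos in_game out) := by unfold Spec_all_combos; infer_instance

-- ===== CLAIM (what is proved, stated in full; the proofs are below) =====
def Claim_equal_all_combos : Prop := ∀ (in_game : List String), Dom_all_combos in_game → Spec_all_combos in_game (all_combos in_game)

-- ===== LEMMAS AND PROOFS =====

-- the subset of xs selected by the bits of m
def subFn (xs : List String) (m : Nat) : List String :=
  ((List.range xs.length).filter (fun i => m.testBit i)).map (fun i => xs.getD i "")

theorem bit_cond (m i : Nat) : (m &&& 2 ^ i != 0) = m.testBit i := by
  rw [Nat.and_two_pow]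
  cases h : m.testBit i
  · simp
  · simp [Nat.pos_iff_ne_zero.mp (Nat.two_pow_pos i)]

theorem inner_loop_eq (xs : List String) (m : Nat) (l : List Nat) (acc : List String) :
    l.foldl (fun cp i => if m.testBit i then cp ++ [xs.getD i ""] else cp) acc
      = acc ++ (l.filter (fun i => m.testBit i)).map (fun i => xs.getD i "") := by
  induction l generalizing acc with
  | nil => simp
  | cons i t ih =>
    rw [List.foldl_cons, List.filter_cons]
    by_cases h : m.testBit i = true
    · rw [if_pos h, if_pos h, ih]; simp
    · rw [if_neg h, if_neg h, ih]

theorem outer_loop_eq {α β : Type} (l : List α) (f : α → β) (init : List β) :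
    l.foldl (fun acc x => acc ++ [f x]) init = init ++ l.map f := by
  induction l generalizing init with
  | nil => simp
  | cons x t ih => simp [List.foldl_cons, ih]

theorem all_combos_eq (xs : List String) :
    all_combos xs = absentOf xs ++ ((List.range (2 ^ xs.length)).drop 1).map (fun m => comboName (subFn xs m)) := by
  unfold all_combos
  rw [outer_loop_eq]
  congr 1
  refine List.map_congr_left (fun m _ => ?_)
  have hfn : (fun (cp : List String) (index : Nat) =>
        if m &&& 2 ^ index != 0 then cp ++ [xs.getD index ""] else cp)
      = (fun cp index => if m.testBit index then cp ++ [xs.getD index ""] else cp) := by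
    funext cp index; rw [bit_cond]
  rw [hfn, inner_loop_eq]
  simp [subFn]

theorem subFn_lo (xs : List String) (x : String) (m : Nat) (hm : m < 2 ^ xs.length) :
    subFn (xs ++ [x]) m = subFn xs m := by
  have hfil : List.filter (fun i => m.testBit i) (List.range (xs ++ [x]).length)
      = List.filter (fun i => m.testBit i) (List.range xs.length) := by
    rw [List.length_append, List.length_singleton, List.range_succ, List.filter_append]
    simp [Nat.testBit_lt_two_pow hm]
  unfold subFn
  rw [hfil]
  refine List.map_congr_left (fun i hi => ?_)
  exact List.getD_append _ _ _ _ (List.mem_range.mp (List.mem_of_mem_filter hi))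

theorem subFn_hi (xs : List String) (x : String) (m : Nat) (hm : m < 2 ^ xs.length) :
    subFn (xs ++ [x]) (2 ^ xs.length + m) = subFn xs m ++ [x] := by
  have hn : m.testBit xs.length = false := Nat.testBit_lt_two_pow hm
  have hfil : List.filter (fun i => (2 ^ xs.length + m).testBit i) (List.range (xs ++ [x]).length)
      = List.filter (fun i => m.testBit i) (List.range xs.length) ++ [xs.length] := by
    rw [List.length_append, List.length_singleton, List.range_succ, List.filter_append]
    congr 1
    · exact List.filter_congr
        (fun i hi => by rw [Nat.testBit_two_pow_add_gt (List.mem_range.mp hi)])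
    · simp [Nat.testBit_two_pow_add_eq, hn]
  unfold subFn
  rw [hfil, List.map_append]
  congr 1
  · refine List.map_congr_left (fun i hi => ?_)
    exact List.getD_append _ _ _ _ (List.mem_range.mp (List.mem_of_mem_filter hi))
  · show [(xs ++ [x]).getD xs.length ""] = [x]
    rw [List.getD_append_right _ _ _ _ (le_refl _)]
    simp

theorem doubling_eq (xs : List String) :
    xs.foldl (fun subs player => subs ++ subs.map (fun s => s ++ [player])) [[]]
      = (List.range (2 ^ xs.length)).map (subFn xs) := by
  induction xs using List.reverseRecOn with
  | nil => simp [subFn]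
  | append_singleton xs x ih =>
    rw [List.foldl_append, List.foldl_cons, List.foldl_nil, ih]
    have h2 : 2 ^ (xs ++ [x]).length = 2 ^ xs.length + 2 ^ xs.length := by
      simp [List.length_append, pow_succ, Nat.mul_two]
    rw [h2, List.range_add, List.map_append, List.map_map, List.map_map]
    congr 1
    · exact (List.map_congr_left
        (fun m hm => subFn_lo xs x m (List.mem_range.mp hm))).symm
    · refine List.map_congr_left (fun m hm => ?_)
      simp only [Function.comp_apply]
      exact (subFn_hi xs x m (List.mem_range.mp hm)).symm

-- ===== VERDICT (by name: the statement is the Claim_ definition above) =====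
theorem all_combos_spec : Claim_equal_all_combos := by
  intro in_game _
  unfold Spec_all_combos
  simp only [all_combos_alt, doubling_eq, all_combos_eq, ← List.map_drop, List.map_map]
  rfl
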